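-- pv_equiv track=rewrite | github.com/rogerlew/wepppy | wepppy/wepp/out/hill_wat.py | _find_headerlines
-- ===== SOURCE A (Python) =====
-- def _find_headerlines(lines):
--     i0 = None
--     iend = None
--
--     for i, L in enumerate(lines):
--         s = L.strip()
--         if s == '':
--             continue
--
--         if s[0] == '-':
--             if i0 == None:
--                 i0 = i
--             else:
--                 iend = i
--
--     return i0 + 1, iend
-- ===== SOURCE B (Python) =====
-- def _find_headerlines(lines):
--     pairs = list(enumerate(lines))
--     i0 = next(i for i, L in pairs if L.strip().startswith('-'))
--     iend = next(i for i, L in reversed(pairs) if L.strip().startswith('-'))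
--     return i0 + 1, iend
-- ===== Notes on version B (the rewrite author's own statement) =====
-- stated objective: alternative
-- what changed: Replaces A's single full pass that carries first/last bookkeeping in two None-initialised variables by two independent early-exit searches: a forward scan for the first dashed line and a backward scan over the reversed list for the last one.
-- outside the precondition, e.g. on _find_headerlines(['-x']): A returns (1, None), B returns (1, 0)
import Mathlib
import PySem

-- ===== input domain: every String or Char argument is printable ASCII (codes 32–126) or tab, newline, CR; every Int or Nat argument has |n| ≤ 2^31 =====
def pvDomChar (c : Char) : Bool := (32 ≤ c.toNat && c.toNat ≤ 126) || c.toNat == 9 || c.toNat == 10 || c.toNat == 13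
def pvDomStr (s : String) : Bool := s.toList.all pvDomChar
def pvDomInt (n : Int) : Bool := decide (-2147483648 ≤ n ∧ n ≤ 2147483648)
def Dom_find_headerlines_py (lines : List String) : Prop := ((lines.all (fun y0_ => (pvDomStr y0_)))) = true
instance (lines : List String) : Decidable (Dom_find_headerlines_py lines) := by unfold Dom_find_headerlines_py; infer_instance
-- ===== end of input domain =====

-- B replaces A's single full pass carrying (i0, iend) Option bookkeeping by two independent
-- early-exit searches: a forward scan for the first dashed line and a backward scan over the
-- reversed enumerated list for the last (alternative decomposition, same cost).
-- Pre_ excludes inputs with fewer than two dashed lines: with none A raises TypeError (None + 1),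
-- with exactly one it returns (i0+1, None), which is not a value of the declared Int × Int type.


-- ===== PORT A =====
-- the for-loop over enumerate(lines), carrying the (i0, iend) Option state
def aLoop : List (Int × String) → Option Int × Option Int → Option Int × Option Int
  | [], st => st
  | (i, L) :: rest, (i0, iend) =>
    let s := PySem.Str.strip L
    if s = "" then aLoop rest (i0, iend)
    else if PySem.Str.pyGet? s 0 = some '-' then
      match i0 with
      | none => aLoop rest (some i, iend)
      | some _ => aLoop rest (i0, some i)
    else aLoop rest (i0, iend)

def find_headerlines_py (lines : List String) : Int × Int :=
  match aLoop (PySem.List.enumerate lines) (none, none) with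
  | (some a, iend) => (a + 1, iend.getD 0)   -- i0 = None → Python raises TypeError (outside Pre_); iend = None → (i0+1, None), outside the Int × Int type (outside Pre_)
  | (none, _) => (0, 0)

-- ===== PORT B =====
-- next(i for i, L in pairs if L.strip().startswith('-')): first match of an early-exit scan
def bNext : List (Int × String) → Option Int
  | [] => none                               -- Python: StopIteration (outside Pre_)
  | (i, L) :: rest =>
    if PySem.Str.startswith (PySem.Str.strip L) "-" then some i else bNext rest

def find_headerlines_py_alt (lines : List String) : Int × Int :=
  let pairs := PySem.List.enumerate lines
  match bNext pairs, bNext pairs.reverse with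
  | some a, some b => (a + 1, b)
  | _, _ => (0, 0)                           -- Python: StopIteration (outside Pre_)

-- ===== PRECONDITION & SPEC =====
-- Pre_ requires at least two dashed header lines: with zero A raises TypeError, with exactly one
-- A returns (i0+1, None), which is not a value of the declared Int × Int return type.
def Pre_find_headerlines_py (lines : List String) : Prop :=
  2 ≤ (lines.filter (fun L => PySem.Str.startswith (PySem.Str.strip L) "-")).length
instance (lines : List String) : Decidable (Pre_find_headerlines_py lines) := by unfold Pre_find_headerlines_py; infer_instance

def pvWitness_find_headerlines_py : List String := ["----", "a  b", "----"]

def Spec_find_headerlines_py (lines : List String) (out : Int × Int) : Prop := out = find_headerlines_py_alt lines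
instance (lines : List String) (out : Int × Int) : Decidable (Spec_find_headerlines_py lines out) := by unfold Spec_find_headerlines_py; infer_instance

-- ===== CLAIM (what is proved, stated in full; the proofs are below) =====
def Claim_equal_find_headerlines_py : Prop := ∀ (lines : List String), Dom_find_headerlines_py lines → Pre_find_headerlines_py lines → Spec_find_headerlines_py lines (find_headerlines_py lines)

-- ===== LEMMAS AND PROOFS =====

-- matching indices of the lines, starting at offset s (proof-only characterisation)
def msIdx : List String → Int → List Int
  | [], _ => []
  | L :: rest, s =>
    if PySem.Str.startswith (PySem.Str.strip L) "-" then s :: msIdx rest (s+1)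
    else msIdx rest (s+1)

-- A's branch test (nonempty stripped line whose first char is '-') is B's startswith test
lemma startswith_dash_iff (s : String) :
    PySem.Str.startswith s "-" = true ↔ s ≠ "" ∧ PySem.Str.pyGet? s 0 = some '-' := by
  have h1 : PySem.Str.startswith s "-" = PySem.Chars.startswith s.toList "-".toList := (PySem.Str.startswith_eq s "-").symm
  have h2 : PySem.Str.pyGet? s 0 = PySem.Chars.pyGet? s.toList 0 := (PySem.Str.pyGet?_eq s 0).symm
  have h3 : (s = "") ↔ s.toList = [] := String.toList_eq_nil_iff.symm
  simp only [ne_eq, h1, h2, h3]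
  rcases hs : s.toList with _ | ⟨c, t⟩
  · simp [PySem.Chars.startswith_iff]
  · simp [PySem.Chars.startswith_iff, PySem.Chars.pyGet?_eq_listPyGet?, List.prefix_cons_iff,
      PySem.List.pyIdx?, PySem.List.pyGet?]
    exact eq_comm

lemma loop_eq (lines : List String) (s : Int) (i0 iend : Option Int) :
    aLoop (PySem.List.enumerate lines s) (i0, iend) =
      ((match i0 with | some a => some a | none => (msIdx lines s).head?),
       (match i0 with
        | some _ => (match (msIdx lines s).getLast? with | some b => some b | none => iend)
        | none => (match (msIdx lines s).tail.getLast? with | some b => some b | none => iend))) := by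
  induction lines generalizing s i0 iend with
  | nil => cases i0 <;> rfl
  | cons L rest ih =>
    rw [PySem.List.enumerate_cons]
    by_cases hm : PySem.Str.startswith (PySem.Str.strip L) "-" = true
    · obtain ⟨hne, hget⟩ := (startswith_dash_iff _).mp hm
      have hms : msIdx (L :: rest) s = s :: msIdx rest (s+1) := by rw [msIdx, if_pos hm]
      cases i0 with
      | none =>
        rw [aLoop, if_neg hne, if_pos hget]
        rw [show (aLoop (PySem.List.enumerate rest (s+1)) (some s, iend)) =
              ((some s : Option Int), match (msIdx rest (s+1)).getLast? with | some b => some b | none => iend) from ih (s+1) (some s) iend]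
        rw [hms]; rfl
      | some a =>
        rw [aLoop, if_neg hne, if_pos hget]
        rw [show (aLoop (PySem.List.enumerate rest (s+1)) (some a, some s)) =
              ((some a : Option Int), match (msIdx rest (s+1)).getLast? with | some b => some b | none => some s) from ih (s+1) (some a) (some s)]
        rw [hms]
        cases h : (msIdx rest (s+1)).getLast? with
        | none => simp [List.getLast?_eq_none_iff.mp h]
        | some b => simp [List.getLast?_cons, h]
    · have hms : msIdx (L :: rest) s = msIdx rest (s+1) := by rw [msIdx, if_neg hm]
      have hskip : ∀ st, aLoop ((s, L) :: PySem.List.enumerate rest (s+1)) st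
          = aLoop (PySem.List.enumerate rest (s+1)) st := by
        rintro ⟨i0, iend⟩
        by_cases hne : PySem.Str.strip L = ""
        · cases i0 <;> rw [aLoop, if_pos hne]
        · have hget : ¬ PySem.Str.pyGet? (PySem.Str.strip L) 0 = some '-' := fun h =>
            hm ((startswith_dash_iff _).mpr ⟨hne, h⟩)
          cases i0 <;> rw [aLoop, if_neg hne, if_neg hget]
      rw [hskip, ih, hms]

-- B's forward scan yields the first matching index
lemma bNext_fwd (lines : List String) (s : Int) :
    bNext (PySem.List.enumerate lines s) = (msIdx lines s).head? := by
  induction lines generalizing s with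
  | nil => simp [bNext, msIdx, PySem.List.enumerate_nil]
  | cons L rest ih =>
    rw [PySem.List.enumerate_cons, bNext, msIdx]
    by_cases hm : PySem.Chars.startswith (PySem.Chars.strip L.toList) ['-'] = true
    · simp [hm]
    · simp [hm, ih]

lemma bNext_append (xs ys : List (Int × String)) :
    bNext (xs ++ ys) = (bNext xs).or (bNext ys) := by
  induction xs with
  | nil => simp [bNext]
  | cons p rest ih =>
    obtain ⟨i, L⟩ := p
    rw [List.cons_append, bNext, bNext]
    by_cases hm : PySem.Chars.startswith (PySem.Chars.strip L.toList) ['-'] = true <;> simp [hm, ih]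

-- B's backward scan (over the reversed list) yields the last matching index
lemma bNext_rev (lines : List String) (s : Int) :
    bNext (PySem.List.enumerate lines s).reverse = (msIdx lines s).getLast? := by
  induction lines generalizing s with
  | nil => simp [bNext, msIdx, PySem.List.enumerate_nil]
  | cons L rest ih =>
    rw [PySem.List.enumerate_cons, List.reverse_cons, bNext_append, ih, msIdx]
    by_cases hm : PySem.Chars.startswith (PySem.Chars.strip L.toList) ['-'] = true
    · rw [if_pos (by simpa [PySem.Str.startswith_eq] using hm : PySem.Str.startswith (PySem.Str.strip L) "-" = true)]
      cases h : (msIdx rest (s+1)).getLast? with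
      | none => simp [List.getLast?_eq_none_iff.mp h, bNext, hm]
      | some b => simp [List.getLast?_cons, h]
    · rw [if_neg (by simpa [PySem.Str.startswith_eq] using hm : ¬ PySem.Str.startswith (PySem.Str.strip L) "-" = true)]
      cases h : (msIdx rest (s+1)).getLast? with
      | none => simp [bNext, hm]
      | some b => simp

lemma filter_len_eq (lines : List String) (s : Int) :
    (msIdx lines s).length = (lines.filter (fun L => PySem.Str.startswith (PySem.Str.strip L) "-")).length := by
  induction lines generalizing s with
  | nil => simp [msIdx]
  | cons L rest ih =>
    have ih' := ih (s+1)
    simp at ih'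
    by_cases hm : PySem.Chars.startswith (PySem.Chars.strip L.toList) ['-'] = true <;>
      simp [msIdx, hm, ih', List.filter]

-- ===== VERDICT (by name: the statement is the Claim_ definition above) =====
theorem find_headerlines_py_spec : Claim_equal_find_headerlines_py := by
  intro lines _ hpre
  unfold Pre_find_headerlines_py at hpre
  unfold Spec_find_headerlines_py find_headerlines_py find_headerlines_py_alt
  have hlen : 2 ≤ (msIdx lines 0).length := by rw [filter_len_eq]; exact hpre
  rcases h : msIdx lines 0 with _ | ⟨a, _ | ⟨b, t⟩⟩ <;> rw [h] at hlen <;> try simp at hlen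
  rw [loop_eq lines 0 none none, h]
  simp only [bNext_fwd lines 0, bNext_rev lines 0, h]
  have hlast : (b :: t).getLast? = some ((b :: t).getLast (by simp)) := List.getLast?_eq_some_getLast (by simp)
  simp [hlast, List.getLast?_cons]
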